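-- pv_equiv track=rewrite | github.com/mattdeak/street-signs | run.py | determine_orientation
-- ===== SOURCE A (Python) =====
-- def determine_orientation(box_records):
--     """Determines the orientation of the house number (primarily horizontal or primarily vertical)"""
--     # TODO: Sort by x value, take 1st - last. Compare to sorted by y value
--     # smaller value is the dominant orientation. (E.g smaller x1 - x4 == vertical orientation)
--     bboxes = [record[2] for record in box_records]
--     x_sorted = sorted(bboxes, key=lambda x: x[0])
--     y_sorted = sorted(bboxes, key=lambda x: x[1])
--
--     x_diff = abs(x_sorted[0][0] - x_sorted[-1][0])
--     y_diff = abs(y_sorted[0][1] - y_sorted[-1][1])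
--
--     if x_diff > y_diff:
--         return "horizontal"
--     else:
--         return "vertical"
-- ===== SOURCE B (Python) =====
-- def determine_orientation(box_records):
--     """Single-pass min/max scan over the bboxes instead of two sorts."""
--     bboxes = [record[2] for record in box_records]
--     first = bboxes[0]
--     min_x = max_x = first[0]
--     min_y = max_y = first[1]
--     for box in bboxes:
--         x, y = box[0], box[1]
--         min_x = min(min_x, x)
--         max_x = max(max_x, x)
--         min_y = min(min_y, y)
--         max_y = max(max_y, y)
--     return "horizontal" if max_x - min_x > max_y - min_y else "vertical"
-- ===== Notes on version B (the rewrite author's own statement) =====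
-- stated objective: simpler
-- what changed: Replaces the two stable sorts (by x and by y) plus end-element indexing with a single linear scan keeping running min/max of the x and y coordinates.
import Mathlib
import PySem

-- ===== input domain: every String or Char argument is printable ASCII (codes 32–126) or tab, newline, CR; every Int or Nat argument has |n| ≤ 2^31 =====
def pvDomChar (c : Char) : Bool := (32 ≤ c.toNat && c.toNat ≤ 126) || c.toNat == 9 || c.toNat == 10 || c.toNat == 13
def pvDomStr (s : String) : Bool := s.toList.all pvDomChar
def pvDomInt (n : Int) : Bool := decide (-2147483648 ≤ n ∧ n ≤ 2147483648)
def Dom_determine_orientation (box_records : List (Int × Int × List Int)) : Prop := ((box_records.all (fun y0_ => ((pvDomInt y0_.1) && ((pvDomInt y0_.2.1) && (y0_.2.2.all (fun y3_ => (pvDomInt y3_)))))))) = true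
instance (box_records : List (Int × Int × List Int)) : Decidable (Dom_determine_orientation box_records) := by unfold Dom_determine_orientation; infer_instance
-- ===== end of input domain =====

-- B replaces A's two stable sorts with one linear min/max scan over the coordinates (simpler single pass).


-- ===== PORT A =====
def determine_orientation (box_records : List (Int × Int × List Int)) : String :=
  let bboxes := box_records.map (fun record => record.2.2)
  let x_sorted := PySem.List.sorted bboxes (fun x => PySem.List.pyGetD x 0 0) false
  let y_sorted := PySem.List.sorted bboxes (fun x => PySem.List.pyGetD x 1 0) false
  let x_diff := |PySem.List.pyGetD (PySem.List.pyGetD x_sorted 0 []) 0 0 -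
                 PySem.List.pyGetD (PySem.List.pyGetD x_sorted (-1) []) 0 0|
  let y_diff := |PySem.List.pyGetD (PySem.List.pyGetD y_sorted 0 []) 1 0 -
                 PySem.List.pyGetD (PySem.List.pyGetD y_sorted (-1) []) 1 0|
  if x_diff > y_diff then "horizontal" else "vertical"

-- ===== PORT B =====
def determine_orientation_alt (box_records : List (Int × Int × List Int)) : String :=
  let bboxes := box_records.map (fun record => record.2.2)
  let first := PySem.List.pyGetD bboxes 0 []
  let x0 := PySem.List.pyGetD first 0 0
  let y0 := PySem.List.pyGetD first 1 0
  let st := bboxes.foldl (fun (s : Int × Int × Int × Int) box =>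
      let x := PySem.List.pyGetD box 0 0
      let y := PySem.List.pyGetD box 1 0
      (min s.1 x, max s.2.1 x, min s.2.2.1 y, max s.2.2.2 y))
    (x0, x0, y0, y0)
  if st.2.1 - st.1 > st.2.2.2 - st.2.2.1 then "horizontal" else "vertical"

-- ===== PRECONDITION & SPEC =====
-- Pre_ excludes exactly the inputs where Python A raises: the empty list (IndexError on x_sorted[0])
-- and any record whose bbox has fewer than 2 coordinates (IndexError in a sort key or final lookup).
def Pre_determine_orientation (box_records : List (Int × Int × List Int)) : Prop :=
  box_records ≠ [] ∧ ∀ r ∈ box_records, 2 ≤ r.2.2.length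
instance (box_records : List (Int × Int × List Int)) : Decidable (Pre_determine_orientation box_records) := by
  unfold Pre_determine_orientation; infer_instance
def pvWitness_determine_orientation : (List (Int × Int × List Int)) := [(0, 0, [1, 2])]
def Spec_determine_orientation (box_records : List (Int × Int × List Int)) (out : String) : Prop := out = determine_orientation_alt box_records
instance (box_records : List (Int × Int × List Int)) (out : String) : Decidable (Spec_determine_orientation box_records out) := by unfold Spec_determine_orientation; infer_instance

-- ===== CLAIM (what is proved, stated in full; the proofs are below) =====
def Claim_equal_determine_orientation : Prop := ∀ (box_records : List (Int × Int × List Int)), Dom_determine_orientation box_records → Pre_determine_orientation box_records → Spec_determine_orientation box_records (determine_orientation box_records)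

-- ===== LEMMAS AND PROOFS =====

-- B's four accumulators are componentwise fold min/max over the mapped coordinates.
theorem foldl4_minmax (l : List (List Int)) (fx fy : List Int → Int) (a b c d : Int) :
    l.foldl (fun (s : Int × Int × Int × Int) box =>
        (min s.1 (fx box), max s.2.1 (fx box), min s.2.2.1 (fy box), max s.2.2.2 (fy box)))
      (a, b, c, d)
    = ((l.map fx).foldl min a, (l.map fx).foldl max b,
       (l.map fy).foldl min c, (l.map fy).foldl max d) := by
  induction l generalizing a b c d with
  | nil => rfl
  | cons h t ih => simp [ih]

-- the head of sorted(xs, key=f) is a member attaining the minimum of f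
theorem sorted_head_min (xs : List (List Int)) (f : List Int → Int) (hne : xs ≠ []) :
    PySem.List.pyGetD (PySem.List.sorted xs f false) 0 [] ∈ xs ∧
    ∀ y ∈ xs, f (PySem.List.pyGetD (PySem.List.sorted xs f false) 0 []) ≤ f y := by
  have hs : PySem.List.sorted xs f false ≠ [] := by
    simpa [PySem.List.sorted_eq_nil_iff] using hne
  obtain ⟨m, t, hmt⟩ := List.exists_cons_of_ne_nil hs
  rw [hmt, PySem.List.pyGetD_zero_cons]
  constructor
  · have : m ∈ PySem.List.sorted xs f false := by rw [hmt]; exact List.mem_cons_self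
    exact (PySem.List.mem_sorted _ _ _ _).1 this
  · exact PySem.List.key_head_sorted_le xs f hmt

-- the last element of sorted(xs, key=f) is a member attaining the maximum of f
theorem sorted_last_max (xs : List (List Int)) (f : List Int → Int) (hne : xs ≠ []) :
    PySem.List.pyGetD (PySem.List.sorted xs f false) (-1) [] ∈ xs ∧
    ∀ y ∈ xs, f y ≤ f (PySem.List.pyGetD (PySem.List.sorted xs f false) (-1) []) := by
  have hs : PySem.List.sorted xs f false ≠ [] := by
    simpa [PySem.List.sorted_eq_nil_iff] using hne
  rw [PySem.List.pyGetD_neg_one _ _ hs]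
  constructor
  · exact (PySem.List.mem_sorted _ _ _ _).1 (List.getLast_mem hs)
  · intro y hy
    have hy' : y ∈ PySem.List.sorted xs f false := (PySem.List.mem_sorted _ _ _ _).2 hy
    obtain ⟨i, hi, hiy⟩ := List.mem_iff_getElem.1 hy'
    have hlast : (PySem.List.sorted xs f false).getLast hs
        = (PySem.List.sorted xs f false)[(PySem.List.sorted xs f false).length - 1] := by
      rw [List.getLast_eq_getElem]
    have hpos : 0 < (PySem.List.sorted xs f false).length := List.length_pos_iff.2 hs
    rw [hlast, ← hiy]
    exact PySem.List.key_sorted_getElem_mono xs f (by omega) (by omega)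

theorem min_unique (K : List Int) (u v : Int) (hu : u ∈ K) (hul : ∀ y ∈ K, u ≤ y)
    (hv : v ∈ K) (hvl : ∀ y ∈ K, v ≤ y) : u = v :=
  le_antisymm (hul v hv) (hvl u hu)

-- running min over t.map f seeded with f h is a member of (h::t).map f and a lower bound of it
theorem foldl_min_char (h : List Int) (t : List (List Int)) (f : List Int → Int) :
    (t.map f).foldl min (f h) ∈ (h :: t).map f ∧
    ∀ y ∈ (h :: t).map f, (t.map f).foldl min (f h) ≤ y := by
  have hle := PySem.List.foldl_min_le (t.map f) (f h)
  have hmem := PySem.List.foldl_min_mem (t.map f) (f h)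
  constructor
  · rcases hmem with h1 | h1
    · simp [h1]
    · simp [List.mem_cons]; right; simpa using h1
  · intro y hy
    rcases List.mem_cons.1 hy with rfl | hy'
    · exact hle.1
    · exact hle.2 y hy'

theorem foldl_max_char (h : List Int) (t : List (List Int)) (f : List Int → Int) :
    (t.map f).foldl max (f h) ∈ (h :: t).map f ∧
    ∀ y ∈ (h :: t).map f, y ≤ (t.map f).foldl max (f h) := by
  have hle := PySem.List.le_foldl_max (t.map f) (f h)
  have hmem := PySem.List.foldl_max_mem (t.map f) (f h)
  constructor
  · rcases hmem with h1 | h1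
    · simp [h1]
    · simp [List.mem_cons]; right; simpa using h1
  · intro y hy
    rcases List.mem_cons.1 hy with rfl | hy'
    · exact hle.1
    · exact hle.2 y hy'

-- ===== VERDICT (by name: the statement is the Claim_ definition above) =====
theorem determine_orientation_spec : Claim_equal_determine_orientation := by
  intro bs _ hpre
  obtain ⟨hne, _⟩ := hpre
  unfold Spec_determine_orientation determine_orientation determine_orientation_alt
  obtain ⟨r, rs, rfl⟩ := List.exists_cons_of_ne_nil hne
  simp only []
  set fx : List Int → Int := fun x => PySem.List.pyGetD x 0 0 with hfx
  set fy : List Int → Int := fun x => PySem.List.pyGetD x 1 0 with hfy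
  set bboxes : List (List Int) := (r :: rs).map (fun record => record.2.2) with hbb
  have hbbne : bboxes ≠ [] := by simp [hbb]
  obtain ⟨h, t, hht⟩ : ∃ h t, bboxes = h :: t := ⟨r.2.2, rs.map (fun record => record.2.2), by simp [hbb]⟩
  -- characterize A's four accessed elements
  have hxmin := sorted_head_min bboxes fx hbbne
  have hxmax := sorted_last_max bboxes fx hbbne
  have hymin := sorted_head_min bboxes fy hbbne
  have hymax := sorted_last_max bboxes fy hbbne
  -- characterize B's fold
  rw [hht] at *
  have hfirst : PySem.List.pyGetD (h :: t) 0 [] = h := PySem.List.pyGetD_zero_cons _ _ _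
  rw [hfirst]
  have hfold := foldl4_minmax (h :: t) fx fy (fx h) (fx h) (fy h) (fy h)
  have hstep : ((h :: t).foldl (fun (s : Int × Int × Int × Int) box =>
        let x := PySem.List.pyGetD box 0 0
        let y := PySem.List.pyGetD box 1 0
        (min s.1 x, max s.2.1 x, min s.2.2.1 y, max s.2.2.2 y))
      (fx h, fx h, fy h, fy h))
      = ((t.map fx).foldl min (fx h), (t.map fx).foldl max (fx h),
         (t.map fy).foldl min (fy h), (t.map fy).foldl max (fy h)) := by
    simpa [hfx, hfy, min_self, max_self] using hfold
  rw [hstep]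
  -- equal extrema on both sides
  have hminx := foldl_min_char h t fx
  have hmaxx := foldl_max_char h t fx
  have hminy := foldl_min_char h t fy
  have hmaxy := foldl_max_char h t fy
  have exmin : PySem.List.pyGetD (PySem.List.pyGetD (PySem.List.sorted (h :: t) fx false) 0 []) 0 0 = (t.map fx).foldl min (fx h) :=
    min_unique ((h :: t).map fx) _ _ (List.mem_map_of_mem hxmin.1)
      (by intro y hy; obtain ⟨z, hz, rfl⟩ := List.mem_map.1 hy; exact hxmin.2 z hz)
      hminx.1 hminx.2
  have exmax : PySem.List.pyGetD (PySem.List.pyGetD (PySem.List.sorted (h :: t) fx false) (-1) []) 0 0 = (t.map fx).foldl max (fx h) :=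
    le_antisymm (hmaxx.2 _ (List.mem_map_of_mem hxmax.1))
      (by obtain ⟨z, hz, hz2⟩ := List.mem_map.1 hmaxx.1; rw [← hz2]; exact hxmax.2 z hz)
  have eymin : PySem.List.pyGetD (PySem.List.pyGetD (PySem.List.sorted (h :: t) fy false) 0 []) 1 0 = (t.map fy).foldl min (fy h) :=
    min_unique ((h :: t).map fy) _ _ (List.mem_map_of_mem hymin.1)
      (by intro y hy; obtain ⟨z, hz, rfl⟩ := List.mem_map.1 hy; exact hymin.2 z hz)
      hminy.1 hminy.2
  have eymax : PySem.List.pyGetD (PySem.List.pyGetD (PySem.List.sorted (h :: t) fy false) (-1) []) 1 0 = (t.map fy).foldl max (fy h) :=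
    le_antisymm (hmaxy.2 _ (List.mem_map_of_mem hymax.1))
      (by obtain ⟨z, hz, hz2⟩ := List.mem_map.1 hmaxy.1; rw [← hz2]; exact hymax.2 z hz)
  -- min ≤ max bounds, to resolve the abs
  have hxle : fx (PySem.List.pyGetD (PySem.List.sorted (h :: t) fx false) 0 [])
      ≤ fx (PySem.List.pyGetD (PySem.List.sorted (h :: t) fx false) (-1) []) :=
    hxmin.2 _ hxmax.1
  have hyle : fy (PySem.List.pyGetD (PySem.List.sorted (h :: t) fy false) 0 [])
      ≤ fy (PySem.List.pyGetD (PySem.List.sorted (h :: t) fy false) (-1) []) :=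
    hymin.2 _ hymax.1
  have hxle' : (t.map fx).foldl min (fx h) ≤ (t.map fx).foldl max (fx h) := by
    rw [← exmin, ← exmax]; exact hxle
  have hyle' : (t.map fy).foldl min (fy h) ≤ (t.map fy).foldl max (fy h) := by
    rw [← eymin, ← eymax]; exact hyle
  rw [exmin, exmax, eymin, eymax]
  rw [abs_sub_comm ((t.map fx).foldl min (fx h)), abs_sub_comm ((t.map fy).foldl min (fy h))]
  rw [abs_of_nonneg (by omega), abs_of_nonneg (by omega)]
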